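-- pv_equiv track=rewrite | github.com/CoderFake/AIChatBot | api/workflows/langgraph/nodes/progress_tracker_node.py | _determine_processing_status
-- ===== SOURCE A (Python) =====
-- from typing import Dict, Any, List, Optional
--
-- def _determine_processing_status(formatted_tasks: List[Dict[str, Any]], current_step: str) -> str:
--     """
--     Determine overall processing status based on task states
--     """
--     if not formatted_tasks:
--         return "pending"
--
--     # Check if all tasks are completed
--     all_completed = all(task.get("status") == "completed" for task in formatted_tasks)
--     if all_completed:
--         return "completed"
--
--     # Check if any tasks are in progress
--     any_in_progress = any(task.get("status") in ["in_progress", "retrying"] for task in formatted_tasks)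
--     if any_in_progress:
--         return "running"
--
--     # Check if any tasks failed
--     any_failed = any(task.get("status") == "failed" for task in formatted_tasks)
--     if any_failed:
--         # If some completed and some failed, still running
--         any_completed = any(task.get("status") == "completed" for task in formatted_tasks)
--         if any_completed:
--             return "running"
--         return "failed"
--
--     # Default to pending if all tasks are pending
--     return "pending"
-- ===== SOURCE B (Python) =====
-- def _determine_processing_status(formatted_tasks, current_step):
--     """Single-pass tally of statuses, then decide from the counts."""
--     if not formatted_tasks:
--         return "pending"
--     completed = active = failed = 0
--     for task in formatted_tasks:
--         s = task.get("status")
--         if s == "completed":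
--             completed += 1
--         elif s == "in_progress" or s == "retrying":
--             active += 1
--         elif s == "failed":
--             failed += 1
--     if completed == len(formatted_tasks):
--         return "completed"
--     if active > 0:
--         return "running"
--     if failed > 0:
--         return "running" if completed > 0 else "failed"
--     return "pending"
-- ===== Notes on version B (the rewrite author's own statement) =====
-- stated objective: alternative
-- what changed: A makes up to four separate all/any scans over the task list; B tallies completed/active/failed counts in a single pass and decides purely from the counts in the same precedence order.
import Mathlib
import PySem

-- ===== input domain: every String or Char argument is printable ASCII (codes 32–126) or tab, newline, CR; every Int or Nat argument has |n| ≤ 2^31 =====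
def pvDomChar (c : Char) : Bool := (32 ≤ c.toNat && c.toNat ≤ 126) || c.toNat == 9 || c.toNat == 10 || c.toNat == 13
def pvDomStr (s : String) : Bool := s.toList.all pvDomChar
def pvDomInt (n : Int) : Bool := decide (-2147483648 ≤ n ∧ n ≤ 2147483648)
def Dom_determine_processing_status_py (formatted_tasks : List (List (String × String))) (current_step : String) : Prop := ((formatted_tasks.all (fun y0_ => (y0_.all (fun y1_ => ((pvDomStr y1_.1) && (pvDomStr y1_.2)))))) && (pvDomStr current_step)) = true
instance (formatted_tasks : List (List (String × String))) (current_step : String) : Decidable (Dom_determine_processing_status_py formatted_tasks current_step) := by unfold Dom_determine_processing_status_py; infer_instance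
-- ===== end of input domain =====

-- B replaces A's up-to-four all/any scans over the task list by a single-pass tally of
-- completed/active/failed counts and decides from the counts in the same precedence order.


-- ===== PORT A =====
def determine_processing_status_py (formatted_tasks : List (List (String × String))) (current_step : String) : String :=
  if formatted_tasks.isEmpty then "pending"
  else
    let all_completed := formatted_tasks.all (fun task => PySem.Dict.get? (PySem.Dict.mk task) "status" == some "completed")
    if all_completed then "completed"
    else
      let any_in_progress := formatted_tasks.any (fun task =>
        ([some "in_progress", some "retrying"] : List (Option String)).contains (PySem.Dict.get? (PySem.Dict.mk task) "status"))
      if any_in_progress then "running"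
      else
        let any_failed := formatted_tasks.any (fun task => PySem.Dict.get? (PySem.Dict.mk task) "status" == some "failed")
        if any_failed then
          let any_completed := formatted_tasks.any (fun task => PySem.Dict.get? (PySem.Dict.mk task) "status" == some "completed")
          if any_completed then "running" else "failed"
        else "pending"

-- ===== PORT B =====
-- one step of B's tallying loop
def pvTallyStep (acc : Int × Int × Int) (task : List (String × String)) : Int × Int × Int :=
  let s := PySem.Dict.get? (PySem.Dict.mk task) "status"
  if s == some "completed" then (acc.1 + 1, acc.2.1, acc.2.2)
  else if s == some "in_progress" || s == some "retrying" then (acc.1, acc.2.1 + 1, acc.2.2)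
  else if s == some "failed" then (acc.1, acc.2.1, acc.2.2 + 1)
  else acc

def determine_processing_status_py_alt (formatted_tasks : List (List (String × String))) (current_step : String) : String :=
  if formatted_tasks.isEmpty then "pending"
  else
    let c := formatted_tasks.foldl pvTallyStep (0, 0, 0)
    if c.1 = (formatted_tasks.length : Int) then "completed"
    else if 0 < c.2.1 then "running"
    else if 0 < c.2.2 then (if 0 < c.1 then "running" else "failed")
    else "pending"

-- ===== PRECONDITION & SPEC =====
def Spec_determine_processing_status_py (formatted_tasks : List (List (String × String))) (current_step : String) (out : String) : Prop := out = determine_processing_status_py_alt formatted_tasks current_step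
instance (formatted_tasks : List (List (String × String))) (current_step : String) (out : String) : Decidable (Spec_determine_processing_status_py formatted_tasks current_step out) := by unfold Spec_determine_processing_status_py; infer_instance

-- ===== CLAIM (what is proved, stated in full; the proofs are below) =====
def Claim_equal_determine_processing_status_py : Prop := ∀ (formatted_tasks : List (List (String × String))) (current_step : String), Dom_determine_processing_status_py formatted_tasks current_step → Spec_determine_processing_status_py formatted_tasks current_step (determine_processing_status_py formatted_tasks current_step)

-- ===== LEMMAS AND PROOFS =====

-- the three mutually exclusive categories B tallies
def pvIsCompleted (task : List (String × String)) : Bool := PySem.Dict.get? (PySem.Dict.mk task) "status" == some "completed"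
def pvIsActive (task : List (String × String)) : Bool :=
  PySem.Dict.get? (PySem.Dict.mk task) "status" == some "in_progress" || PySem.Dict.get? (PySem.Dict.mk task) "status" == some "retrying"
def pvIsFailed (task : List (String × String)) : Bool := PySem.Dict.get? (PySem.Dict.mk task) "status" == some "failed"

lemma pvTallyStep_eq (acc : Int × Int × Int) (t : List (String × String)) :
    pvTallyStep acc t = (acc.1 + (if pvIsCompleted t then 1 else 0),
                         acc.2.1 + (if pvIsActive t then 1 else 0),
                         acc.2.2 + (if pvIsFailed t then 1 else 0)) := by
  unfold pvTallyStep pvIsCompleted pvIsActive pvIsFailed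
  cases h : PySem.Dict.get? (PySem.Dict.mk t) "status" <;> simp [beq_eq_decide] <;> split_ifs <;> simp_all

lemma pvFold_eq (l : List (List (String × String))) (a b c : Int) :
    l.foldl pvTallyStep (a, b, c) =
      (a + (l.countP pvIsCompleted : Int), b + (l.countP pvIsActive : Int), c + (l.countP pvIsFailed : Int)) := by
  induction l generalizing a b c with
  | nil => simp
  | cons t ts ih =>
    simp only [List.foldl_cons, pvTallyStep_eq, ih, List.countP_cons]
    split_ifs <;> push_cast <;> ring_nf <;> simp [Prod.ext_iff] <;> omega

lemma pvContains_eq (t : List (String × String)) :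
    ([some "in_progress", some "retrying"] : List (Option String)).contains (PySem.Dict.get? (PySem.Dict.mk t) "status")
      = pvIsActive t := by
  unfold pvIsActive
  cases PySem.Dict.get? (PySem.Dict.mk t) "status" <;> simp [List.contains_eq_mem, beq_eq_decide]

lemma pvCount_eq_length_iff (p : List (String × String) → Bool) (l : List (List (String × String))) :
    ((l.countP p : Int) = (l.length : Int)) ↔ l.all p = true := by
  rw [Int.natCast_inj, List.countP_eq_length, List.all_eq_true]

lemma pvCount_pos_iff (p : List (String × String) → Bool) (l : List (List (String × String))) :
    ((0 : Int) < (l.countP p : Int)) ↔ l.any p = true := by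
  rw [Int.natCast_pos, List.countP_pos_iff, List.any_eq_true]

-- ===== VERDICT (by name: the statement is the Claim_ definition above) =====
theorem determine_processing_status_py_spec : Claim_equal_determine_processing_status_py := by
  intro ft cs _
  unfold Spec_determine_processing_status_py determine_processing_status_py determine_processing_status_py_alt
  by_cases he : ft.isEmpty
  · simp [he]
  · simp only [he, pvFold_eq, zero_add]
    simp only [pvContains_eq,
      show (fun task => PySem.Dict.get? (PySem.Dict.mk task) "status" == some "completed") = pvIsCompleted from rfl,
      show (fun task => PySem.Dict.get? (PySem.Dict.mk task) "status" == some "failed") = pvIsFailed from rfl,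
      show (fun task => pvIsActive task) = pvIsActive from rfl]
    by_cases hall : ft.all pvIsCompleted = true
    · rw [if_pos hall, if_pos ((pvCount_eq_length_iff _ _).mpr hall)]
    · rw [if_neg hall, if_neg (fun h => hall ((pvCount_eq_length_iff _ _).mp h))]
      by_cases hact : ft.any pvIsActive = true
      · rw [if_pos hact, if_pos ((pvCount_pos_iff _ _).mpr hact)]
      · rw [if_neg hact, if_neg (fun h => hact ((pvCount_pos_iff _ _).mp h))]
        by_cases hf : ft.any pvIsFailed = true
        · rw [if_pos hf, if_pos ((pvCount_pos_iff _ _).mpr hf)]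
          by_cases hc : ft.any pvIsCompleted = true
          · rw [if_pos hc, if_pos ((pvCount_pos_iff _ _).mpr hc)]
          · rw [if_neg hc, if_neg (fun h => hc ((pvCount_pos_iff _ _).mp h))]
        · rw [if_neg hf, if_neg (fun h => hf ((pvCount_pos_iff _ _).mp h))]
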